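-- pv_equiv track=rewrite | github.com/SeoHyungjun/Coding_Test | vscode/programmers/힙/더맵게/a.py | solution
-- ===== SOURCE A (Python) =====
-- def solution(scoville, K):
--     answer = 0
--
--     while min(scoville) < K:
--         if len(scoville) == 1:
--             answer = -1
--             break
--
--         min_1 = scoville.pop(scoville.index(min(scoville)))
--         min_2 = scoville.pop(scoville.index(min(scoville)))
--
--         scoville.append(min_1 + min_2 * 2)
--
--         answer += 1
--
--     return answer
-- ===== SOURCE B (Python) =====
-- def solution(scoville, K):
--     sc = sorted(scoville)
--     answer = 0
--     while sc[0] < K: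
--         if len(sc) == 1:
--             return -1
--         new = sc[0] + 2 * sc[1]
--         rest = sc[2:]
--         # insert `new` into the sorted list `rest`, keeping it sorted
--         i = 0
--         while i < len(rest) and rest[i] < new:
--             i += 1
--         rest.insert(i, new)
--         sc = rest
--         answer += 1
--     return answer
-- ===== Notes on version B (the rewrite author's own statement) =====
-- stated objective: faster
-- what changed: B sorts the list once and maintains sortedness with a single ordered-insert scan per operation, instead of A's four full min/index scans plus two pops per operation.
-- outside the precondition, e.g. on solution([], 7): A raises ValueError, B raises IndexError
import Mathlib
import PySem

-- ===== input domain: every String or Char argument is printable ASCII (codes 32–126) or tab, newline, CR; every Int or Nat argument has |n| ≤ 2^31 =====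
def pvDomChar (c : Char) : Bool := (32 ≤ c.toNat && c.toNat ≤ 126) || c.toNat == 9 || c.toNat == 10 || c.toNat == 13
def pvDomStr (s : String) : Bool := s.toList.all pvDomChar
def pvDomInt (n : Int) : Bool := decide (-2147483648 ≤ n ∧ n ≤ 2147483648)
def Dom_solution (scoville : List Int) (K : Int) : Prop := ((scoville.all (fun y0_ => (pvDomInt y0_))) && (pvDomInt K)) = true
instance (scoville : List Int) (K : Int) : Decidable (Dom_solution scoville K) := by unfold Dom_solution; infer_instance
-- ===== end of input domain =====

-- B sorts the list once and keeps it sorted by an ordered insert, instead of A's repeated min/index/pop scans;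
-- equivalence is about the RETURN value only (A mutates its list argument in place, B does not).

-- ===== PORT A =====
-- while-loop fueled by the list length: each iteration shortens the list by one, so the fuel is never exhausted
def solutionLoopA (K : Int) : Nat → List Int → Int → Int
  | 0, _, ans => ans
  | fuel + 1, sc, ans =>
    match PySem.List.min? sc (fun x => x) with
    | none => ans  -- Python: min([]) raises ValueError; excluded by Pre_solution
    | some m =>
      if m < K then
        if sc.length = 1 then -1
        else
          match PySem.List.index? sc m with
          | none => ans  -- unreachable: m ∈ sc
          | some i1 =>
            match PySem.List.pop? sc (i1 : Int) with
            | none => ans  -- unreachable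
            | some r1 =>
              match PySem.List.min? r1.2 (fun x => x) with
              | none => ans  -- unreachable: |sc| ≥ 2
              | some m2 =>
                match PySem.List.index? r1.2 m2 with
                | none => ans  -- unreachable
                | some i2 =>
                  match PySem.List.pop? r1.2 (i2 : Int) with
                  | none => ans  -- unreachable
                  | some r2 =>
                    solutionLoopA K fuel (r2.2 ++ [r1.1 + r2.1 * 2]) (ans + 1)
      else ans

def solution (scoville : List Int) (K : Int) : Int :=
  solutionLoopA K scoville.length scoville 0

-- ===== PORT B =====
-- Source B's inner while: scan the sorted list to the first position whose element is not < x, insert x there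
def insSorted (x : Int) : List Int → List Int
  | [] => [x]
  | y :: ys => if y < x then y :: insSorted x ys else x :: y :: ys

def solutionLoopB (K : Int) : Nat → List Int → Int → Int
  | 0, _, ans => ans
  | fuel + 1, sc, ans =>
    match sc with
    | [] => ans  -- Python: sc[0] raises IndexError; excluded by Pre_solution
    | [a] => if a < K then -1 else ans
    | a :: b :: rest =>
      if a < K then solutionLoopB K fuel (insSorted (a + 2 * b) rest) (ans + 1)
      else ans

def solution_alt (scoville : List Int) (K : Int) : Int :=
  solutionLoopB K scoville.length (PySem.List.sorted scoville (fun x => x) false) 0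

-- ===== PRECONDITION & SPEC =====
-- Pre_ excludes only the empty list, on which both Pythons raise (A: ValueError from min([]), B: IndexError).
def Pre_solution (scoville : List Int) (K : Int) : Prop := scoville ≠ []
instance (scoville : List Int) (K : Int) : Decidable (Pre_solution scoville K) := by unfold Pre_solution; infer_instance
def pvWitness_solution : List Int × Int := ([1, 2, 3, 9, 10, 12], 7)

def Spec_solution (scoville : List Int) (K : Int) (out : Int) : Prop := out = solution_alt scoville K
instance (scoville : List Int) (K : Int) (out : Int) : Decidable (Spec_solution scoville K out) := by unfold Spec_solution; infer_instance

-- ===== CLAIM (what is proved, stated in full; the proofs are below) =====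
def Claim_equal_solution : Prop := ∀ (scoville : List Int) (K : Int), Dom_solution scoville K → Pre_solution scoville K → Spec_solution scoville K (solution scoville K)

-- ===== LEMMAS AND PROOFS =====

theorem min?_of_perm_sorted {sc : List Int} {a : Int} {tl : List Int}
    (hp : sc.Perm (a :: tl)) (hs : (a :: tl).Pairwise (· ≤ ·)) :
    PySem.List.min? sc (fun x => x) = some a := by
  have hne : sc ≠ [] := by
    intro h; subst h; exact (List.cons_ne_nil a tl) hp.symm.eq_nil
  obtain ⟨m, hm⟩ : ∃ m, PySem.List.min? sc (fun x => x) = some m := by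
    cases h : PySem.List.min? sc (fun x => x) with
    | none => exact absurd ((PySem.List.min?_eq_none_iff sc _).mp h) hne
    | some m => exact ⟨m, rfl⟩
  have hmem : m ∈ sc := PySem.List.min?_mem hm
  have hma : m ≤ a := PySem.List.min?_isMin hm a (hp.mem_iff.mpr (List.mem_cons_self))
  have ham : a ≤ m := by
    have := hp.mem_iff.mp hmem
    rcases List.mem_cons.mp this with h | h
    · exact le_of_eq h.symm
    · exact (List.pairwise_cons.mp hs).1 m h
  rw [hm, le_antisymm hma ham]

theorem eraseIdx_append_len {α : Type} (pre : List α) (v : α) (suf : List α) :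
    (pre ++ v :: suf).eraseIdx pre.length = pre ++ suf := by
  induction pre with
  | nil => simp
  | cons p ps ih => simpa [List.eraseIdx] using ih

theorem pop_at_index {xs : List Int} {v : Int} {k : Nat}
    (h : PySem.List.index? xs v = some k) :
    PySem.List.pop? xs (k : Int) = some (v, xs.erase v) := by
  obtain ⟨pre, suf, hxs, hlen, hnm⟩ := (PySem.List.index?_eq_some_iff xs v k).mp h
  subst hxs
  have hk : k < (pre ++ v :: suf).length := by
    simp [← hlen]
  rw [PySem.List.pop?_natCast _ _ hk]
  congr 1
  subst hlen
  have h1 : (pre ++ v :: suf)[pre.length] = v := by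
    simp
  have h2 : (pre ++ v :: suf).eraseIdx pre.length = pre ++ suf := eraseIdx_append_len pre v suf
  have h3 : (pre ++ v :: suf).erase v = pre ++ suf := by
    rw [List.erase_append_right _ (by simpa using hnm), List.erase_cons_head]
  simp [h1, h2, h3]

theorem insSorted_perm (x : Int) (l : List Int) : (insSorted x l).Perm (x :: l) := by
  induction l with
  | nil => simp [insSorted]
  | cons y ys ih =>
    by_cases h : y < x
    · simpa [insSorted, h] using ((ih.cons y).trans (List.Perm.swap x y ys))
    · simp [insSorted, h]

theorem insSorted_pairwise (x : Int) {l : List Int} (h : l.Pairwise (· ≤ ·)) :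
    (insSorted x l).Pairwise (· ≤ ·) := by
  induction l with
  | nil => simp [insSorted]
  | cons y ys ih =>
    obtain ⟨hy, hys⟩ := List.pairwise_cons.mp h
    by_cases hlt : y < x
    · rw [insSorted, if_pos hlt]
      refine List.pairwise_cons.mpr ⟨?_, ih hys⟩
      intro z hz
      rcases List.mem_cons.mp ((insSorted_perm x ys).mem_iff.mp hz) with h1 | h1
      · exact le_of_lt (h1 ▸ hlt)
      · exact hy z h1
    · rw [insSorted, if_neg hlt]
      refine List.pairwise_cons.mpr ⟨?_, h⟩
      intro z hz
      rcases List.mem_cons.mp hz with h1 | h1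
      · exact h1 ▸ le_of_not_gt hlt
      · exact le_trans (le_of_not_gt hlt) (hy z h1)

theorem loop_eq (K : Int) : ∀ (fuel : Nat) (sc sc' : List Int) (ans : Int),
    sc.Perm sc' → sc'.Pairwise (· ≤ ·) →
    solutionLoopA K fuel sc ans = solutionLoopB K fuel sc' ans := by
  intro fuel
  induction fuel with
  | zero => intro sc sc' ans _ _; rfl
  | succ fuel ih =>
    intro sc sc' ans hp hs
    match sc' with
    | [] =>
      have hn : sc = [] := hp.eq_nil
      subst hn
      simp [solutionLoopA, solutionLoopB, PySem.List.min?]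
    | a :: tl =>
      have hmin : PySem.List.min? sc (fun x => x) = some a := min?_of_perm_sorted hp hs
      have hlen : sc.length = tl.length + 1 := by simpa using hp.length_eq
      by_cases hK : a < K
      · cases tl with
        | nil =>
          have h1 : sc.length = 1 := by simp [hlen]
          simp [solutionLoopA, solutionLoopB, hmin, hK, h1]
        | cons b rest =>
          have h1 : ¬ sc.length = 1 := by simp [hlen]
          have hamem : a ∈ sc := hp.mem_iff.mpr List.mem_cons_self
          obtain ⟨i1, hi1⟩ : ∃ i, PySem.List.index? sc a = some i :=
            Option.isSome_iff_exists.mp ((PySem.List.index?_isSome_iff sc a).mpr hamem)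
          have hpop1 := pop_at_index hi1
          have hp1 : (sc.erase a).Perm (b :: rest) := by
            simpa [List.erase_cons_head] using hp.erase a
          have hs1 : (b :: rest).Pairwise (· ≤ ·) := (List.pairwise_cons.mp hs).2
          have hmin2 : PySem.List.min? (sc.erase a) (fun x => x) = some b :=
            min?_of_perm_sorted hp1 hs1
          have hbmem : b ∈ sc.erase a := hp1.mem_iff.mpr List.mem_cons_self
          obtain ⟨i2, hi2⟩ : ∃ i, PySem.List.index? (sc.erase a) b = some i :=
            Option.isSome_iff_exists.mp ((PySem.List.index?_isSome_iff _ b).mpr hbmem)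
          have hpop2 := pop_at_index hi2
          have he : ((sc.erase a).erase b).Perm rest := by
            simpa [List.erase_cons_head] using hp1.erase b
          have hp2 : (((sc.erase a).erase b) ++ [a + b * 2]).Perm (insSorted (a + 2 * b) rest) := by
            rw [show a + b * 2 = a + 2 * b by ring]
            exact (List.perm_append_comm.trans ((he.cons _).trans (insSorted_perm _ rest).symm))
          have hs2 : (insSorted (a + 2 * b) rest).Pairwise (· ≤ ·) :=
            insSorted_pairwise _ (List.pairwise_cons.mp hs1).2
          have hstep := ih _ _ (ans + 1) hp2 hs2
          simp only [solutionLoopA, solutionLoopB, hmin, if_pos hK, if_neg h1, hi1, hpop1,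
            hmin2, hi2, hpop2]
          exact hstep
      · cases tl with
        | nil => simp [solutionLoopA, solutionLoopB, hmin, hK]
        | cons b rest => simp [solutionLoopA, solutionLoopB, hmin, hK]

-- ===== VERDICT (by name: the statement is the Claim_ definition above) =====
theorem solution_spec : Claim_equal_solution := by
  intro scoville K _ _
  unfold Spec_solution solution solution_alt
  rw [← PySem.List.length_sorted scoville (fun x => x) false]
  exact loop_eq K _ _ _ 0 (PySem.List.sorted_perm scoville (fun x => x) false).symm
    (PySem.List.sorted_pairwise scoville (fun x => x))
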